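-- pv_equiv track=rewrite | github.com/nsol-nmsu/HetSec-Evaluation | TaskCompletion_test/saga/saga/common/contact_policy.py | pattern_specificity_component
-- ===== SOURCE A (Python) =====
-- def pattern_specificity_component(component, weight=1):
--     score = 0
--     i = 0
--     while i < len(component):
--         c = component[i]
--         if c == '*':
--             score += 1 * weight
--         elif c == '?':
--             score += 2 * weight
--         elif c == '[':
--             end = component.find(']', i)
--             if end != -1:
--                 score += 3 * weight
--                 i = end
--             else:
--                 score += 1 * weight
--         else:
--             score += 4 * weight
--         i += 1
--     return score
-- ===== SOURCE B (Python) =====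
-- def pattern_specificity_component(component, weight=1):
--     # single-pass state machine: scores after an open bracket are deferred in
--     # `pending` and only used if the bracket never closes
--     total = 0
--     pending = None
--     for c in component:
--         if pending is not None:
--             if c == ']':
--                 total += 3
--                 pending = None
--             elif c == '*' or c == '[':
--                 pending += 1
--             elif c == '?':
--                 pending += 2
--             else:
--                 pending += 4
--         elif c == '[':
--             pending = 0
--         elif c == '*':
--             total += 1
--         elif c == '?':
--             total += 2
--         else:
--             total += 4
--     if pending is not None:
--         total += 1 + pending
--     return total * weight
-- ===== Notes on version B (the rewrite author's own statement) =====
-- stated objective: faster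
-- what changed: Replaced the index-jumping scan that calls str.find on each open bracket by a single forward state-machine pass that defers the scores of characters after an open bracket and only uses them if the bracket never closes.
import Mathlib
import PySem

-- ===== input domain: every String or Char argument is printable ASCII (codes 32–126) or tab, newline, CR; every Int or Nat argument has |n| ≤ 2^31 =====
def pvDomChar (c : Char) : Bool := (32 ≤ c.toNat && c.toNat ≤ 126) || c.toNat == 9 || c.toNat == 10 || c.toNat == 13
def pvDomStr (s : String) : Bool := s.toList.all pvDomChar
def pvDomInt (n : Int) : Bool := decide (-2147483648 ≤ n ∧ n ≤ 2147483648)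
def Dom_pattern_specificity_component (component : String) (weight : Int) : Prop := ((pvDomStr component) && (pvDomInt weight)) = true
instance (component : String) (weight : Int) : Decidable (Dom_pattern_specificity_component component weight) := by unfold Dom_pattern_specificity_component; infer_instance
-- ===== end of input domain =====

-- B replaces A's index-jumping scan (str.find on each open bracket) with a single
-- forward state-machine pass deferring scores after an open bracket (measured faster).

-- ===== PORT A =====
-- the while loop of A: i is the scan index, score the accumulator
def pvLoopA (w : Int) (cs : List Char) (i : Nat) (score : Int) : Int :=
  if h : i < cs.length then
    let c := cs[i]
    if c = '*' then pvLoopA w cs (i + 1) (score + 1 * w)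
    else if c = '?' then pvLoopA w cs (i + 1) (score + 2 * w)
    else if c = '[' then
      -- component.find(']', i)
      let e := PySem.Chars.findFrom cs [']'] (i : Int)
      if e ≠ -1 then pvLoopA w cs (e.toNat + 1) (score + 3 * w)
      else pvLoopA w cs (i + 1) (score + 1 * w)
    else pvLoopA w cs (i + 1) (score + 4 * w)
  else score
termination_by cs.length - i
decreasing_by
  all_goals try omega
  rename_i _e he
  have hs := PySem.Chars.findFrom_natCast_spec cs [']'] i (Nat.le_of_lt h) he
  omega

def pattern_specificity_component (component : String) (weight : Int) : Int :=
  pvLoopA weight component.toList 0 0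

-- ===== PORT B =====
-- one step of B's state machine: state = (total, pending score inside an open '[')
def pvStepB (st : Int × Option Int) (c : Char) : Int × Option Int :=
  match st with
  | (total, some p) =>
    if c = ']' then (total + 3, none)
    else if c = '*' ∨ c = '[' then (total, some (p + 1))
    else if c = '?' then (total, some (p + 2))
    else (total, some (p + 4))
  | (total, none) =>
    if c = '[' then (total, some 0)
    else if c = '*' then (total + 1, none)
    else if c = '?' then (total + 2, none)
    else (total + 4, none)

def pattern_specificity_component_alt (component : String) (weight : Int) : Int :=
  let st := component.toList.foldl pvStepB (0, none)
  (match st.2 with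
   | some p => st.1 + 1 + p
   | none => st.1) * weight

-- ===== PRECONDITION & SPEC =====
def Spec_pattern_specificity_component (component : String) (weight : Int) (out : Int) : Prop := out = pattern_specificity_component_alt component weight
instance (component : String) (weight : Int) (out : Int) : Decidable (Spec_pattern_specificity_component component weight out) := by unfold Spec_pattern_specificity_component; infer_instance

-- ===== CLAIM (what is proved, stated in full; the proofs are below) =====
def Claim_equal_pattern_specificity_component : Prop := ∀ (component : String) (weight : Int), Dom_pattern_specificity_component component weight → Spec_pattern_specificity_component component weight (pattern_specificity_component component weight)

-- ===== LEMMAS AND PROOFS =====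

-- unweighted specificity score of a suffix (proof-side reference function)
def pvR : List Char → Int
  | [] => 0
  | c :: t =>
    if c = '*' then 1 + pvR t
    else if c = '?' then 2 + pvR t
    else if c = '[' then
      match t.findIdx? (· == ']') with
      | some k => 3 + pvR (t.drop (k + 1))
      | none => 1 + pvR t
    else 4 + pvR t
termination_by l => l.length
decreasing_by
  all_goals simp

-- score of one character when no ']' follows
def pvV (c : Char) : Int := if c = '*' ∨ c = '[' then 1 else if c = '?' then 2 else 4

-- reference value of B's pending state p over the rest of the input
def pvRp (p : Int) : List Char → Int
  | [] => 1 + p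
  | c :: u => if c = ']' then 3 + pvR u else pvRp (p + pvV c) u

theorem pvRp_cons (p : Int) (c : Char) (u : List Char) :
    pvRp p (c :: u) = if c = ']' then 3 + pvR u else pvRp (p + pvV c) u := rfl

theorem pvR_no_bracket (l : List Char) (h : List.findIdx? (· == ']') l = none) :
    pvR l = (l.map pvV).sum := by
  induction l with
  | nil => simp [pvR]
  | cons c u ih =>
    rw [List.findIdx?_cons] at h
    have hc : ¬ c = ']' := by
      intro hc; subst hc; simp at h
    have hu : List.findIdx? (· == ']') u = none := by
      by_cases hpc : (c == ']') = true
      · simp [hpc] at h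
      · simpa [hpc] using h
    rw [pvR, hu]
    simp only [List.map_cons, List.sum_cons, ih hu, pvV]
    split_ifs with h1 h2 h3 h4 h5 <;> simp_all

theorem pvRp_char (l : List Char) (p : Int) :
    pvRp p l = match List.findIdx? (· == ']') l with
      | some k => 3 + pvR (l.drop (k + 1))
      | none => 1 + p + (l.map pvV).sum := by
  induction l generalizing p with
  | nil => simp [pvRp]
  | cons c u ih =>
    rw [List.findIdx?_cons]
    by_cases hc : c = ']'
    · subst hc; simp [pvRp_cons]
    · have hbc : (c == ']') = false := by simp [hc]
      rw [pvRp_cons, if_neg hc, ih, hbc]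
      cases hu : List.findIdx? (· == ']') u with
      | some k => simp [List.drop_succ_cons]
      | none => simp; ring

theorem pvR_bracket (t : List Char) : pvR ('[' :: t) = pvRp 0 t := by
  rw [pvR, pvRp_char]
  cases h : List.findIdx? (· == ']') t with
  | some k => simp
  | none =>
    have := pvR_no_bracket t h
    simp [this]

def pvFinal (st : Int × Option Int) : Int :=
  match st.2 with
  | some p => st.1 + 1 + p
  | none => st.1

theorem pvFoldB (l : List Char) : ∀ (t : Int) (st : Option Int),
    pvFinal (l.foldl pvStepB (t, st)) =
      t + (match st with | none => pvR l | some p => pvRp p l) := by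
  induction l with
  | nil =>
    intro t st
    cases st with
    | none => simp [pvFinal, pvR]
    | some p => simp [pvFinal, pvRp]; ring
  | cons c u ih =>
    have ihn : ∀ t : Int, pvFinal (u.foldl pvStepB (t, none)) = t + pvR u :=
      fun t => ih t none
    have ihs : ∀ (t p : Int), pvFinal (u.foldl pvStepB (t, some p)) = t + pvRp p u :=
      fun t p => ih t (some p)
    intro t st
    cases st with
    | none =>
      show pvFinal (List.foldl pvStepB (pvStepB (t, none) c) u) = t + pvR (c :: u)
      by_cases h1 : c = '['
      · subst h1
        rw [show pvStepB (t, none) '[' = (t, some 0) from rfl, ihs, pvR_bracket]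
      · by_cases h2 : c = '*'
        · subst h2
          rw [show pvStepB (t, none) '*' = (t + 1, none) from rfl, ihn, pvR, if_pos rfl]; ring
        · by_cases h3 : c = '?'
          · subst h3
            rw [show pvStepB (t, none) '?' = (t + 2, none) from rfl, ihn,
              pvR, if_neg (by decide), if_pos rfl]; ring
          · have hstep : pvStepB (t, none) c = (t + 4, none) := by
              simp [pvStepB, h1, h2, h3]
            rw [hstep, ihn, pvR, if_neg h2, if_neg h3, if_neg h1]; ring
    | some p =>
      show pvFinal (List.foldl pvStepB (pvStepB (t, some p) c) u) = t + pvRp p (c :: u)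
      by_cases h1 : c = ']'
      · subst h1
        rw [show pvStepB (t, some p) ']' = (t + 3, none) from rfl, ihn, pvRp_cons, if_pos rfl]; ring
      · by_cases h2 : c = '*' ∨ c = '['
        · have hstep : pvStepB (t, some p) c = (t, some (p + 1)) := by
            rcases h2 with h | h <;> subst h <;> rfl
          rw [hstep, ihs, pvRp_cons, if_neg h1]
          have hv : pvV c = 1 := by simp [pvV, h2]
          rw [hv]
        · by_cases h3 : c = '?'
          · subst h3
            rw [show pvStepB (t, some p) '?' = (t, some (p + 2)) from rfl, ihs,
              pvRp_cons, if_neg (by decide)]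
            have hv : pvV '?' = 2 := by simp [pvV]
            rw [hv]
          · have hstep : pvStepB (t, some p) c = (t, some (p + 4)) := by
              simp [pvStepB, h1, h2, h3]
            rw [hstep, ihs, pvRp_cons, if_neg h1]
            have hv : pvV c = 4 := by simp [pvV, h2, h3]
            rw [hv]

-- s.find(c) as the first index of c
theorem pvFindSingle (l : List Char) (c : Char) :
    PySem.Chars.find l [c] = match List.findIdx? (· == c) l with
      | some k => (k : Int)
      | none => -1 := by
  cases h : List.findIdx? (· == c) l with
  | none =>
    have hmem : c ∉ l := by
      intro hc
      have := (List.findIdx?_eq_none_iff).mp h c hc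
      simp at this
    have : ¬ [c] <:+: l := by
      rw [List.singleton_infix_iff]; exact hmem
    simpa using (PySem.Chars.find_eq_neg_one_iff l [c]).mpr this
  | some k =>
    obtain ⟨hk, hget, hmin⟩ := (List.findIdx?_eq_some_iff_getElem (xs := l) (p := (· == c)) (i := k)).mp h
    have hcg : l[k] = c := by simpa using hget
    have hmem : c ∈ l := by rw [← hcg]; exact List.getElem_mem hk
    have hinf : [c] <:+: l := (List.singleton_infix_iff c l).mpr hmem
    have hnn : 0 ≤ PySem.Chars.find l [c] := (PySem.Chars.find_nonneg_iff l [c]).mpr hinf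
    obtain ⟨hpre, hfmin⟩ := PySem.Chars.find_spec hnn
    set m := (PySem.Chars.find l [c]).toNat with hm
    have hprefix_iff : ∀ j : Nat, ([c] <+: l.drop j) ↔ l[j]? = some c := by
      intro j
      rw [← List.head?_drop]
      cases l.drop j with
      | nil => simp
      | cons a u => simp [List.cons_prefix_cons, eq_comm]
    have hml : l[m]? = some c := (hprefix_iff m).mp hpre
    have hmk : m = k := by
      rcases Nat.lt_trichotomy m k with hlt | heq | hgt
      · have hmlen : m < l.length := by omega
        rw [List.getElem?_eq_getElem hmlen] at hml
        have hmc : l[m] = c := by simpa using hml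
        have := hmin m hlt
        simp_all
      · exact heq
      · have hcontra := hfmin k hgt
        rw [hprefix_iff k, List.getElem?_eq_getElem hk] at hcontra
        simp_all
    show PySem.Chars.find l [c] = (k : Int)
    omega

theorem pvLoopA_eq (w : Int) (cs : List Char) : ∀ n i s, cs.length - i ≤ n → i ≤ cs.length →
    pvLoopA w cs i s = s + w * pvR (cs.drop i) := by
  intro n
  induction n with
  | zero =>
    intro i s hn hi
    have : i = cs.length := by omega
    subst this
    rw [pvLoopA]
    simp [pvR]
  | succ n ih =>
    intro i s hn hi
    rw [pvLoopA]
    by_cases h : i < cs.length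
    · rw [dif_pos h]
      have hdrop : cs.drop i = cs[i] :: cs.drop (i + 1) := (List.getElem_cons_drop h).symm
      by_cases h1 : cs[i] = '*'
      · rw [if_pos h1, ih (i+1) _ (by omega) (by omega), hdrop, pvR, if_pos h1]; ring
      · rw [if_neg h1]
        by_cases h2 : cs[i] = '?'
        · rw [if_pos h2, ih (i+1) _ (by omega) (by omega), hdrop, pvR, if_neg h1, if_pos h2]; ring
        · rw [if_neg h2]
          by_cases h3 : cs[i] = '['
          · rw [if_pos h3]
            have hff := PySem.Chars.findFrom_natCast cs [']'] i (Nat.le_of_lt h)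
            have hfs := pvFindSingle (cs.drop i) ']'
            have hb : (cs[i] == ']') = false := by simp [h3]
            have hidx0 : List.findIdx? (· == ']') (cs.drop i)
                = Option.map (· + 1) (List.findIdx? (· == ']') (cs.drop (i + 1))) := by
              rw [hdrop, List.findIdx?_cons, hb]
              simp
            rw [hidx0] at hfs
            cases hidx : List.findIdx? (· == ']') (cs.drop (i+1)) with
            | some k =>
              have hfind : PySem.Chars.find (cs.drop i) [']'] = ((k+1 : Nat) : Int) := by
                rw [hfs, hidx]; simp
              have he : PySem.Chars.findFrom cs [']'] (i : Int) = ((i + k + 1 : Nat) : Int) := by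
                rw [hff, hfind, if_neg (by omega)]; push_cast; ring
              rw [he]
              have hne : ((i + k + 1 : Nat) : Int) ≠ -1 := by omega
              rw [if_pos hne]
              have htn : ((i + k + 1 : Nat) : Int).toNat = i + k + 1 := by omega
              rw [htn, ih (i + k + 1 + 1) _ (by omega) ?hle]
              case hle =>
                have hk := (List.findIdx?_eq_some_iff_getElem (xs := cs.drop (i+1)) (p := (· == ']')) (i := k)).mp hidx
                have := hk.1
                simp only [List.length_drop] at this
                omega
              · rw [hdrop, pvR, if_neg h1, if_neg h2, if_pos h3, hidx]
                have : cs.drop (i + k + 1 + 1) = (cs.drop (i+1)).drop (k+1) := by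
                  rw [List.drop_drop]; ring_nf
                rw [this]; ring
            | none =>
              have hfind : PySem.Chars.find (cs.drop i) [']'] = -1 := by rw [hfs, hidx]; rfl
              have he : PySem.Chars.findFrom cs [']'] (i : Int) = -1 := by
                rw [hff, hfind]; simp
              rw [he, if_neg (by simp), ih (i+1) _ (by omega) (by omega)]
              rw [hdrop, pvR, if_neg h1, if_neg h2, if_pos h3, hidx]; ring
          · rw [if_neg h3, ih (i+1) _ (by omega) (by omega), hdrop, pvR, if_neg h1, if_neg h2, if_neg h3]; ring
    · rw [dif_neg h]
      have : i = cs.length := by omega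
      subst this
      simp [pvR]

-- ===== VERDICT (by name: the statement is the Claim_ definition above) =====
theorem pattern_specificity_component_spec : Claim_equal_pattern_specificity_component := by
  intro component weight _
  unfold Spec_pattern_specificity_component pattern_specificity_component pattern_specificity_component_alt
  rw [pvLoopA_eq weight component.toList component.toList.length 0 0 (by omega) (by omega)]
  have hb := pvFoldB component.toList 0 none
  simp only [List.drop_zero, zero_add]
  rw [show (match (component.toList.foldl pvStepB (0, none)).2 with
      | some p => (component.toList.foldl pvStepB (0, none)).1 + 1 + p
      | none => (component.toList.foldl pvStepB (0, none)).1) = pvFinal (component.toList.foldl pvStepB (0, none)) from rfl]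
  rw [hb]
  ring
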